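-- pv_equiv track=rewrite | github.com/chirag127/chirag127.github.io | src/tools/repository_analyzer.py | detect_repo_type
-- ===== SOURCE A (Python) =====
-- def detect_repo_type(files: list[str]) -> str:
--     """Detect repository type from file structure."""
--     files_lower = [f.lower() for f in files]
--
--     if any("manifest.json" in f for f in files_lower):
--         return "browser_extension"
--     if any(f.endswith("index.html") for f in files_lower):
--         return "website"
--     if any(f in files_lower for f in ["pyproject.toml", "setup.py", "requirements.txt"]):
--         return "python"
--     if any(f in files_lower for f in ["package.json", "tsconfig.json"]):
--         return "typescript"
--     if "cargo.toml" in files_lower: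
--         return "rust"
--     if "go.mod" in files_lower:
--         return "go"
--     return "generic"
-- ===== SOURCE B (Python) =====
-- def detect_repo_type(files: list[str]) -> str:
--     """Detect repository type from file structure (single pass + priority decision)."""
--     has_manifest = has_index = has_py = has_ts = has_rust = has_go = False
--     for f in files:
--         g = f.lower()
--         if "manifest.json" in g:
--             has_manifest = True
--         if g.endswith("index.html"):
--             has_index = True
--         if g in ("pyproject.toml", "setup.py", "requirements.txt"):
--             has_py = True
--         if g in ("package.json", "tsconfig.json"):
--             has_ts = True
--         if g == "cargo.toml":
--             has_rust = True
--         if g == "go.mod":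
--             has_go = True
--     if has_manifest:
--         return "browser_extension"
--     if has_index:
--         return "website"
--     if has_py:
--         return "python"
--     if has_ts:
--         return "typescript"
--     if has_rust:
--         return "rust"
--     if has_go:
--         return "go"
--     return "generic"
-- ===== Notes on version B (the rewrite author's own statement) =====
-- stated objective: alternative
-- what changed: Replaces six separate short-circuiting scans over the file list with a single pass that accumulates six boolean flags, followed by one priority-ordered decision over the flags.
import Mathlib
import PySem

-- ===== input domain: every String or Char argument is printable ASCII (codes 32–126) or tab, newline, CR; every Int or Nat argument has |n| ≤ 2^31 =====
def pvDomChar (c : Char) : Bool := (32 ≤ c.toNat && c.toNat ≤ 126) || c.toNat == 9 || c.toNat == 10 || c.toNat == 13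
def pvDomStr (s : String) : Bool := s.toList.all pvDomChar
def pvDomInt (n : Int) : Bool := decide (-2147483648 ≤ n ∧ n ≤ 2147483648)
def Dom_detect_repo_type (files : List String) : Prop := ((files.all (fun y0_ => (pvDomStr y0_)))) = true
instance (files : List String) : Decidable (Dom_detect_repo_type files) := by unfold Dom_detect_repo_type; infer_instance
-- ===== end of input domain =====

-- B replaces A's six separate scans of the file list with a single pass accumulating six
-- boolean flags followed by one priority-ordered decision (alternative decomposition, same cost).

-- ===== PORT A =====
def detect_repo_type (files : List String) : String :=
  let files_lower := files.map (fun f => PySem.Str.lower f)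
  if files_lower.any (fun f => PySem.Str.isIn "manifest.json" f) then "browser_extension"
  else if files_lower.any (fun f => PySem.Str.endswith f "index.html") then "website"
  else if ["pyproject.toml", "setup.py", "requirements.txt"].any (fun f => files_lower.contains f) then "python"
  else if ["package.json", "tsconfig.json"].any (fun f => files_lower.contains f) then "typescript"
  else if files_lower.contains "cargo.toml" then "rust"
  else if files_lower.contains "go.mod" then "go"
  else "generic"

-- ===== PORT B =====
-- one pass accumulating six flags, then a priority decision (Source B's loop)
def detect_repo_type_step (s : Bool × Bool × Bool × Bool × Bool × Bool)
    (f : String) : Bool × Bool × Bool × Bool × Bool × Bool :=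
  let g := PySem.Str.lower f
  (s.1 || PySem.Str.isIn "manifest.json" g,
   s.2.1 || PySem.Str.endswith g "index.html",
   s.2.2.1 || (g == "pyproject.toml" || g == "setup.py" || g == "requirements.txt"),
   s.2.2.2.1 || (g == "package.json" || g == "tsconfig.json"),
   s.2.2.2.2.1 || g == "cargo.toml",
   s.2.2.2.2.2 || g == "go.mod")

def detect_repo_type_flags (files : List String) :
    Bool × Bool × Bool × Bool × Bool × Bool :=
  files.foldl detect_repo_type_step (false, false, false, false, false, false)

def detect_repo_type_alt (files : List String) : String :=
  let s := detect_repo_type_flags files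
  if s.1 then "browser_extension"
  else if s.2.1 then "website"
  else if s.2.2.1 then "python"
  else if s.2.2.2.1 then "typescript"
  else if s.2.2.2.2.1 then "rust"
  else if s.2.2.2.2.2 then "go"
  else "generic"

-- ===== PRECONDITION & SPEC =====
def Spec_detect_repo_type (files : List String) (out : String) : Prop := out = detect_repo_type_alt files
instance (files : List String) (out : String) : Decidable (Spec_detect_repo_type files out) := by unfold Spec_detect_repo_type; infer_instance

-- ===== CLAIM (what is proved, stated in full; the proofs are below) =====
def Claim_equal_detect_repo_type : Prop := ∀ (files : List String), Dom_detect_repo_type files → Spec_detect_repo_type files (detect_repo_type files)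

-- ===== LEMMAS AND PROOFS =====

theorem detect_repo_type_flags_foldl (files : List String)
    (s0 : Bool × Bool × Bool × Bool × Bool × Bool) :
    files.foldl detect_repo_type_step s0 =
      (s0.1 || files.any (fun f => PySem.Str.isIn "manifest.json" (PySem.Str.lower f)),
       s0.2.1 || files.any (fun f => PySem.Str.endswith (PySem.Str.lower f) "index.html"),
       s0.2.2.1 || files.any (fun f => PySem.Str.lower f == "pyproject.toml" || PySem.Str.lower f == "setup.py" || PySem.Str.lower f == "requirements.txt"),
       s0.2.2.2.1 || files.any (fun f => PySem.Str.lower f == "package.json" || PySem.Str.lower f == "tsconfig.json"),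
       s0.2.2.2.2.1 || files.any (fun f => PySem.Str.lower f == "cargo.toml"),
       s0.2.2.2.2.2 || files.any (fun f => PySem.Str.lower f == "go.mod")) := by
  induction files generalizing s0 with
  | nil => simp
  | cons hd tl ih =>
    rw [List.foldl_cons, ih]
    simp [detect_repo_type_step, Bool.or_assoc]

theorem any_or_split {α : Type} (l : List α) (p q : α → Bool) :
    l.any (fun x => p x || q x) = (l.any p || l.any q) := by
  induction l with
  | nil => rfl
  | cons hd tl ih =>
    simp only [List.any_cons, ih]
    cases p hd <;> cases q hd <;> simp

theorem detect_repo_type_flags_spec (files : List String) :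
    detect_repo_type_flags files =
      (files.any (fun f => PySem.Str.isIn "manifest.json" (PySem.Str.lower f)),
       files.any (fun f => PySem.Str.endswith (PySem.Str.lower f) "index.html"),
       files.any (fun f => PySem.Str.lower f == "pyproject.toml" || PySem.Str.lower f == "setup.py" || PySem.Str.lower f == "requirements.txt"),
       files.any (fun f => PySem.Str.lower f == "package.json" || PySem.Str.lower f == "tsconfig.json"),
       files.any (fun f => PySem.Str.lower f == "cargo.toml"),
       files.any (fun f => PySem.Str.lower f == "go.mod")) := by
  rw [detect_repo_type_flags, detect_repo_type_flags_foldl]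
  simp

theorem contains_map_lower (files : List String) (x : String) :
    (files.map (fun f => PySem.Str.lower f)).contains x =
      files.any (fun f => PySem.Str.lower f == x) := by
  induction files with
  | nil => rfl
  | cons hd tl ih =>
    simp only [List.map_cons, List.contains_cons, List.any_cons, ih]
    rw [BEq.comm]

-- ===== VERDICT (by name: the statement is the Claim_ definition above) =====
theorem detect_repo_type_spec : Claim_equal_detect_repo_type := by
  intro files _
  unfold Spec_detect_repo_type detect_repo_type detect_repo_type_alt
  simp only [detect_repo_type_flags_spec, List.any_map, Function.comp_def,
    List.any_cons, List.any_nil, contains_map_lower, Bool.or_false,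
    any_or_split, Bool.or_assoc]
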